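-- pv_equiv track=rewrite | github.com/Yamyee/ipaAnalyze | size_analyze.py | get_file_line
-- ===== SOURCE A (Python) =====
-- def get_file_line(contents):
--     index=0
--     file_lines=[]
--     size_lines=[]
--     start=False
--     for i in range(len(contents)):
--         index = i
--         line = contents[i]
--         if '# Sections:' in line:
--             break
--         if '[  1] dtrace' in line:
--             start = True
--             continue
--         if start == False:
--             continue
--
--         file_lines.append(line)
--
--     start = False
--     for i in range(index,len(contents)):
--         line = contents[i]
--         if 'Dead Stripped Symbols' in line:
--             break
--         if '# Symbols:' in line:
--             start=True
--             continue
--         if start == False or '# Address	Size' in line: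
--             continue
--         size_lines.append(line)
--     return (file_lines,size_lines)
-- ===== SOURCE B (Python) =====
-- def _size_step(line, started, size_lines):
--     # One size-phase step: returns None on the break line, else the updated 'started' flag.
--     if 'Dead Stripped Symbols' in line:
--         return None
--     if '# Symbols:' in line:
--         return True
--     if not started or '# Address\tSize' in line:
--         return started
--     size_lines.append(line)
--     return started
--
--
-- def get_file_line(contents):
--     file_lines = []
--     size_lines = []
--     in_file = True
--     started = False
--     for line in contents:
--         if in_file:
--             if '# Sections:' in line:
--                 in_file = False
--                 started = _size_step(line, False, size_lines)
--                 if started is None: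
--                     break
--             elif '[  1] dtrace' in line:
--                 started = True
--             elif started:
--                 file_lines.append(line)
--         else:
--             started = _size_step(line, started, size_lines)
--             if started is None:
--                 break
--     return (file_lines, size_lines)
-- ===== Notes on version B (the rewrite author's own statement) =====
-- stated objective: alternative
-- what changed: Replaced A's two sequential index-based loops (the second re-scanning from the recorded break index) with a single pass over the lines that carries a phase flag and one 'started' flag, sharing a size-phase step helper; trades the index bookkeeping for a fused state machine at the same O(n) cost.
import Mathlib
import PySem

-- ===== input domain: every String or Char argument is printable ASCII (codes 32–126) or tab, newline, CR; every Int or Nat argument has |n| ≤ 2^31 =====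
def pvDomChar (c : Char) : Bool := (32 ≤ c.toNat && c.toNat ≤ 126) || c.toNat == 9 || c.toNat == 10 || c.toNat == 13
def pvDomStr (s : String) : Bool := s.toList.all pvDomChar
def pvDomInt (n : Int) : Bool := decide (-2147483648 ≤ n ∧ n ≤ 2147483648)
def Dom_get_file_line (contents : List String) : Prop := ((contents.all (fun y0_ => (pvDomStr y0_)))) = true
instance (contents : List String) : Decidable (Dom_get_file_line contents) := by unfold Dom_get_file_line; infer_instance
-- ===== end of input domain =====

-- B fuses A's two sequential loops into one pass with a phase flag (same O(n) cost, one traversal).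

-- ===== PORT A =====
-- first loop: i = running index, index = Python's 'index' variable, start flag, acc = file_lines
def pvLoopA1 (ls : List String) (i index : Nat) (start : Bool) (acc : List String) :
    Nat × List String :=
  match ls with
  | [] => (index, acc)
  | line :: rest =>
    -- index = i happens before the break test
    if PySem.Str.isIn "# Sections:" line then (i, acc)
    else if PySem.Str.isIn "[  1] dtrace" line then pvLoopA1 rest (i+1) i true acc
    else if start = false then pvLoopA1 rest (i+1) i start acc
    else pvLoopA1 rest (i+1) i start (acc ++ [line])

-- second loop over contents[index:]
def pvLoopA2 (ls : List String) (start : Bool) (acc : List String) : List String :=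
  match ls with
  | [] => acc
  | line :: rest =>
    if PySem.Str.isIn "Dead Stripped Symbols" line then acc
    else if PySem.Str.isIn "# Symbols:" line then pvLoopA2 rest true acc
    else if start = false || PySem.Str.isIn "# Address\tSize" line then pvLoopA2 rest start acc
    else pvLoopA2 rest start (acc ++ [line])

def get_file_line (contents : List String) : List String × List String :=
  let r := pvLoopA1 contents 0 0 false []
  (r.2, pvLoopA2 (contents.drop r.1) false [])

-- ===== PORT B =====
-- one size-phase step: none = break, some (started', size_lines')
def pvSizeStep (line : String) (started : Bool) (sl : List String) :
    Option (Bool × List String) :=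
  if PySem.Str.isIn "Dead Stripped Symbols" line then none
  else if PySem.Str.isIn "# Symbols:" line then some (true, sl)
  else if started = false || PySem.Str.isIn "# Address\tSize" line then some (started, sl)
  else some (started, sl ++ [line])

def pvLoopB (ls : List String) (inFile started : Bool) (fl sl : List String) :
    List String × List String :=
  match ls with
  | [] => (fl, sl)
  | line :: rest =>
    if inFile then
      if PySem.Str.isIn "# Sections:" line then
        match pvSizeStep line false sl with
        | none => (fl, sl)
        | some (st', sl') => pvLoopB rest false st' fl sl'
      else if PySem.Str.isIn "[  1] dtrace" line then pvLoopB rest true true fl sl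
      else if started then pvLoopB rest true started (fl ++ [line]) sl
      else pvLoopB rest true started fl sl
    else
      match pvSizeStep line started sl with
      | none => (fl, sl)
      | some (st', sl') => pvLoopB rest false st' fl sl'

def get_file_line_alt (contents : List String) : List String × List String :=
  pvLoopB contents true false [] []

-- ===== PRECONDITION & SPEC =====
def Spec_get_file_line (contents : List String) (out : List String × List String) : Prop := out = get_file_line_alt contents
instance (contents : List String) (out : List String × List String) : Decidable (Spec_get_file_line contents out) := by unfold Spec_get_file_line; infer_instance

-- ===== CLAIM (what is proved, stated in full; the proofs are below) =====
def Claim_equal_get_file_line : Prop := ∀ (contents : List String), Dom_get_file_line contents → Spec_get_file_line contents (get_file_line contents)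

-- ===== LEMMAS AND PROOFS =====

-- B's size-mode recursion is exactly A's second loop (fl untouched).
theorem pvLoopB_size (ls : List String) (start : Bool) (fl sl : List String) :
    pvLoopB ls false start fl sl = (fl, pvLoopA2 ls start sl) := by
  induction ls generalizing start sl with
  | nil => simp [pvLoopB, pvLoopA2]
  | cons line rest ih =>
    simp only [pvLoopB, pvLoopA2, pvSizeStep, Bool.false_eq_true, if_false]
    split_ifs with h1 h2 h3 <;> first | rfl | simp [ih]

theorem pvLoopA2_short (ls : List String) (h : ls.length ≤ 1) :
    pvLoopA2 ls false [] = [] := by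
  match ls, h with
  | [], _ => simp [pvLoopA2]
  | [line], _ =>
    simp only [pvLoopA2]
    split_ifs <;> simp_all

-- main invariant lemma: the fused pass in file mode equals A's first loop glued to the
-- second loop restarted at the recorded index.
theorem pvMain (ls : List String) (i index : Nat) (start : Bool) (fl : List String)
    (orig : List String) (hdrop : orig.drop i = ls)
    (hidx : ls = [] → (orig.drop index).length ≤ 1) :
    ((pvLoopA1 ls i index start fl).2,
      pvLoopA2 (orig.drop (pvLoopA1 ls i index start fl).1) false []) =
    pvLoopB ls true start fl [] := by
  induction ls generalizing i index start fl with
  | nil =>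
    simp only [pvLoopA1, pvLoopB]
    rw [pvLoopA2_short _ (hidx rfl)]
  | cons line rest ih =>
    have hrest : orig.drop (i+1) = rest := by
      rw [← List.drop_drop, hdrop]; rfl
    have hidx' : rest = [] → (orig.drop i).length ≤ 1 := by
      intro h; rw [hdrop, h]; simp
    by_cases h1 : PySem.Str.isIn "# Sections:" line = true
    · -- '# Sections:' : A breaks; its second loop runs on orig.drop i = line :: rest
      simp only [pvLoopA1, pvLoopB, if_pos h1, hdrop, if_true]
      simp only [pvLoopA2, pvSizeStep]
      split_ifs <;> first | rfl | simp [pvLoopB_size]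
    · by_cases h2 : PySem.Str.isIn "[  1] dtrace" line = true
      · simp only [pvLoopA1, pvLoopB, if_neg h1, if_pos h2]
        exact ih (i+1) i true fl hrest hidx'
      · cases start with
        | false =>
          simp only [pvLoopA1, pvLoopB, if_neg h1, if_neg h2]
          simpa using ih (i+1) i false fl hrest hidx'
        | true =>
          simp only [pvLoopA1, pvLoopB, if_neg h1, if_neg h2]
          simpa using ih (i+1) i true (fl ++ [line]) hrest hidx'
-- ===== VERDICT (by name: the statement is the Claim_ definition above) =====
theorem get_file_line_spec : Claim_equal_get_file_line := by
  intro contents _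
  unfold Spec_get_file_line get_file_line get_file_line_alt
  exact pvMain contents 0 0 false [] contents (by simp) (by intro h; simp [h])
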